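-- pv_equiv track=rewrite | github.com/vainmoon/HSE_algorithms | homework_1/sum/sum.py | get_max_even_sum
-- ===== SOURCE A (Python) =====
-- def get_max_even_sum(array: list) -> int:
--     if not array:
--         raise ValueError("The array must not be empty.")
--
--     sum = 0
--     min_odd_num = float("inf")
--     for num in array:
--         if num % 2 != 0 and num < min_odd_num:
--             min_odd_num = num
--         sum += num
--
--     return sum if sum % 2 == 0 else sum - min_odd_num
-- ===== SOURCE B (Python) =====
-- def get_max_even_sum(array: list) -> int:
--     if not array:
--         raise ValueError("The array must not be empty.")
--
--     ordered = sorted(array)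
--     total = sum(ordered)
--     if total % 2 == 0:
--         return total
--     # the total is odd, so at least one element is odd; the first odd element
--     # in ascending order is the smallest odd one, removing it maximises the sum
--     for x in ordered:
--         if x % 2 != 0:
--             return total - x
-- ===== Notes on version B (the rewrite author's own statement) =====
-- stated objective: alternative
-- what changed: B sorts the array first and, when the total is odd, subtracts the first odd element encountered in ascending order (sort-then-scan), instead of A's single pass that tracks a running minimum odd against float('inf') while summing.
import Mathlib
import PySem

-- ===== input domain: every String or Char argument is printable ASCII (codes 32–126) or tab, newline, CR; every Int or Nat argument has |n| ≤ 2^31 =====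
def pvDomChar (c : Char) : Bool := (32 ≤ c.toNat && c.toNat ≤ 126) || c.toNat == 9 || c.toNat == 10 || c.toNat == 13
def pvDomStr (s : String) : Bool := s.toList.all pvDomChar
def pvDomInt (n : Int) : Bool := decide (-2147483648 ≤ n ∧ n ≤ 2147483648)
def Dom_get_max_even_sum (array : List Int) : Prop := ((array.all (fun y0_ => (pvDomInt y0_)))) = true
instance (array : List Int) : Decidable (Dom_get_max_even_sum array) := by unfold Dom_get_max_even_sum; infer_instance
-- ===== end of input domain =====

-- B sorts the array and subtracts the first odd element in ascending order when the total is odd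
-- (objective: alternative, sort-then-scan instead of A's running-minimum pass); return values proved equal on nonempty arrays.

-- ===== PORT A =====
-- A's loop: min_odd_num starts at float('inf'); modelled as Option Int, none = inf
-- (the 'none' branch of the final subtraction is unreachable when the sum is odd).
def getMaxLoopA : List Int → Int → Option Int → Int × Option Int
  | [], s, m => (s, m)
  | x :: xs, s, m =>
      let m' := if (PySem.Int.mod x 2 != 0) &&
                   (match m with | none => true | some v => decide (x < v)) then some x else m
      getMaxLoopA xs (s + x) m'

def get_max_even_sum (array : List Int) : Int :=
  let r := getMaxLoopA array 0 none
  if PySem.Int.mod r.1 2 == 0 then r.1 else r.1 - r.2.getD 0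

-- ===== PORT B =====
def get_max_even_sum_alt (array : List Int) : Int :=
  let ordered := PySem.List.sorted array (fun x => x) false
  let total := ordered.sum
  if PySem.Int.mod total 2 == 0 then total
  else
    -- the scan 'for x in ordered: if x % 2 != 0: return total - x'; the getD 0
    -- default is unreachable when the total is odd (an odd element exists)
    total - (ordered.find? (fun x => PySem.Int.mod x 2 != 0)).getD 0

-- ===== PRECONDITION & SPEC =====
-- A raises ValueError on the empty list; Pre_ excludes exactly that input.
def Pre_get_max_even_sum (array : List Int) : Prop := array ≠ []
instance (array : List Int) : Decidable (Pre_get_max_even_sum array) := by unfold Pre_get_max_even_sum; infer_instance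
def pvWitness_get_max_even_sum : List Int := [1, 2]

def Spec_get_max_even_sum (array : List Int) (out : Int) : Prop := out = get_max_even_sum_alt array
instance (array : List Int) (out : Int) : Decidable (Spec_get_max_even_sum array out) := by unfold Spec_get_max_even_sum; infer_instance

-- ===== CLAIM (what is proved, stated in full; the proofs are below) =====
def Claim_equal_get_max_even_sum : Prop := ∀ (array : List Int), Dom_get_max_even_sum array → Pre_get_max_even_sum array → Spec_get_max_even_sum array (get_max_even_sum array)

-- ===== LEMMAS AND PROOFS =====

def stepMin (m : Option Int) (x : Int) : Option Int :=
  if (match m with | none => true | some v => decide (x < v)) then some x else m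

lemma getMaxLoopA_fst : ∀ (xs : List Int) (s : Int) (m : Option Int),
    (getMaxLoopA xs s m).1 = s + xs.sum := by
  intro xs
  induction xs with
  | nil => intro s m; simp [getMaxLoopA]
  | cons x t ih => intro s m; simp [getMaxLoopA, ih]; ring

lemma getMaxLoopA_snd : ∀ (xs : List Int) (s : Int) (m : Option Int),
    (getMaxLoopA xs s m).2 = (xs.filter (fun x => PySem.Int.mod x 2 != 0)).foldl stepMin m := by
  intro xs
  induction xs with
  | nil => intro s m; simp [getMaxLoopA]
  | cons x t ih =>
    intro s m
    by_cases h : (PySem.Int.mod x 2 != 0) = true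
    · simp only [getMaxLoopA, ih, List.filter_cons, h, if_pos, Bool.true_and, List.foldl_cons]
      rfl
    · have hf : (PySem.Int.mod x 2 != 0) = false := by simpa using h
      simp only [getMaxLoopA, ih, List.filter_cons, hf, Bool.false_and, if_neg, Bool.false_eq_true,
        not_false_eq_true]

lemma foldl_stepMin_some : ∀ (t : List Int) (a : Int),
    t.foldl stepMin (some a) = some (t.foldl min a) := by
  intro t
  induction t with
  | nil => intro a; simp
  | cons x r ih =>
    intro a
    simp only [List.foldl]
    by_cases h : x < a
    · simp [stepMin, h, ih, le_of_lt h]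
    · simp [stepMin, h, ih, le_of_not_gt h]

lemma foldl_stepMin_mem : ∀ (l : List Int), l ≠ [] →
    ∃ m, l.foldl stepMin (none : Option Int) = some m ∧ m ∈ l ∧ ∀ y ∈ l, m ≤ y := by
  intro l hl
  cases l with
  | nil => exact absurd rfl hl
  | cons x t =>
    have h1 : stepMin none x = some x := by simp [stepMin]
    refine ⟨t.foldl min x, by simp [List.foldl, h1, foldl_stepMin_some], ?_, ?_⟩
    · rcases PySem.List.foldl_min_mem t x with h | h
      · simp [h]
      · simp [h]
    · intro y hy
      rcases List.mem_cons.mp hy with rfl | hy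
      · exact (PySem.List.foldl_min_le t y).1
      · exact (PySem.List.foldl_min_le t x).2 y hy

lemma sum_parity : ∀ (xs : List Int),
    xs.sum % 2 = ((xs.filter (fun x => PySem.Int.mod x 2 != 0)).length : Int) % 2 := by
  intro xs
  induction xs with
  | nil => simp
  | cons x t ih =>
    have hm : PySem.Int.mod x 2 = x % 2 := PySem.Int.mod_eq_emod_of_pos (by omega)
    by_cases h : (PySem.Int.mod x 2 != 0) = true
    · have hx : x % 2 ≠ 0 := by simpa [hm] using h
      simp only [List.sum_cons, List.filter, h, List.length_cons]
      push_cast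
      omega
    · have hb : (PySem.Int.mod x 2 != 0) = false := by simpa using h
      have hx : x % 2 = 0 := by rw [hm] at hb; simpa using hb
      simp only [List.sum_cons, List.filter_cons, hb, Bool.false_eq_true, not_false_eq_true,
        if_neg]
      omega

lemma find?_eq_head?_filter {α : Type} (p : α → Bool) : ∀ (l : List α),
    l.find? p = (l.filter p).head? := by
  intro l
  induction l with
  | nil => simp
  | cons x t ih =>
    by_cases h : p x = true
    · rw [List.find?_cons_of_pos h, List.filter_cons_of_pos h]
      simp
    · have hf : p x = false := by simpa using h
      rw [List.find?_cons_of_neg (by simp [hf]), List.filter_cons_of_neg (by simp [hf]), ih]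

theorem get_max_even_sum_spec : Claim_equal_get_max_even_sum := by
  intro array _ hpre
  unfold Spec_get_max_even_sum get_max_even_sum get_max_even_sum_alt
  have hsum : (PySem.List.sorted array (fun x => x) false).sum = array.sum :=
    (PySem.List.sorted_perm array (fun x => x) false).sum_eq
  simp only [getMaxLoopA_fst, getMaxLoopA_snd, zero_add, hsum, find?_eq_head?_filter]
  set p : Int → Bool := fun x => PySem.Int.mod x 2 != 0 with hp
  set odds := array.filter p with hodds
  have hpar := sum_parity array
  rw [← hp, ← hodds] at hpar
  by_cases he : array.sum % 2 = 0
  · simp [he]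
  · have h1 : array.sum % 2 = 1 := by omega
    have hnil : odds ≠ [] := by
      intro h
      rw [h] at hpar
      simp at hpar
      omega
    -- A's side: the tracked minimum of the odd elements
    obtain ⟨m, hmEq, hmMem, hmMin⟩ := foldl_stepMin_mem odds hnil
    -- B's side: the first odd element of the sorted list
    set sOdds := (PySem.List.sorted array (fun x => x) false).filter p with hsOdds
    have hperm : sOdds.Perm odds :=
      (PySem.List.sorted_perm array (fun x => x) false).filter p
    have hsnil : sOdds ≠ [] := by
      intro h
      have hlen := hperm.length_eq
      rw [h] at hlen
      exact hnil (List.eq_nil_of_length_eq_zero hlen.symm)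
    obtain ⟨h0, t0, hcons⟩ := List.exists_cons_of_ne_nil hsnil
    have hpw : sOdds.Pairwise (fun a b : Int => a ≤ b) :=
      List.Pairwise.sublist List.filter_sublist (PySem.List.sorted_pairwise array (fun x => x))
    have hhead : ∀ y ∈ odds, h0 ≤ y := by
      intro y hy
      have hy' : y ∈ sOdds := hperm.mem_iff.mpr hy
      rw [hcons] at hy' hpw
      rcases List.mem_cons.mp hy' with rfl | hy'
      · exact le_refl _
      · exact (List.pairwise_cons.mp hpw).1 y hy'
    have hh0mem : h0 ∈ odds := hperm.mem_iff.mp (hcons ▸ List.mem_cons_self)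
    have heq : h0 = m := le_antisymm (hhead m hmMem) (hmMin h0 hh0mem)
    simp [h1, hmEq, hcons, heq]
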